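-- pv_equiv track=rewrite | github.com/ElPoul3to/projects | Python/AES_V1.py | espace
-- ===== SOURCE A (Python) =====
-- def espace(s):
--     newS = ""
--     n=len(s)
--     for i in range(n):
--         newS+=s[i]
--         if i %2 == 1 and i<n-1:
--             newS+=" "
--     return newS
-- ===== SOURCE B (Python) =====
-- def espace(s):
--     return " ".join(s[i:i+2] for i in range(0, len(s), 2))
-- ===== Notes on version B (the rewrite author's own statement) =====
-- stated objective: simpler
-- what changed: Replaces the per-character loop with its modulo test and trailing-space guard by grouping the string into two-character chunks via a step-2 range and joining them with a single space.
import Mathlib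
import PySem

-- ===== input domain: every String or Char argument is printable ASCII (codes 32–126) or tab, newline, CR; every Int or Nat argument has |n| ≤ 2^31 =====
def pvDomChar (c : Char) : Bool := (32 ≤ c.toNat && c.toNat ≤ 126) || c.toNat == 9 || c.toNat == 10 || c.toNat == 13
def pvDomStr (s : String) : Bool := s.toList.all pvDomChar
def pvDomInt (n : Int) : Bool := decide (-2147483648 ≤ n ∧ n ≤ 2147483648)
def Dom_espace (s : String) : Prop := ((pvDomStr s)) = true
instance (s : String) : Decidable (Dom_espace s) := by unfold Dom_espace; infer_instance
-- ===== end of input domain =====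

-- B replaces A's per-character loop (modulo test + trailing-space guard) by joining
-- two-character chunks with " " — a simpler decomposition, same result.

-- ===== PORT A =====
-- for i in range(n): newS += s[i]; if i % 2 == 1 and i < n-1: newS += " "
def espace (s : String) : String :=
  let cs := s.toList
  let n : Int := cs.length
  String.ofList ((PySem.List.pyRange 0 n 1).foldl (fun newS i =>
    let newS := newS ++ ((PySem.List.pyGet? cs i).map (fun c => [c])).getD []
    if PySem.Int.mod i 2 = 1 ∧ i < n - 1 then newS ++ [' '] else newS) [])

-- ===== PORT B =====
-- " ".join(s[i:i+2] for i in range(0, len(s), 2))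
def espace_alt (s : String) : String :=
  PySem.Str.join " "
    ((PySem.List.pyRange 0 (PySem.Str.len s) 2).map (fun i => PySem.Str.slice s (some i) (some (i + 2))))

-- ===== PRECONDITION & SPEC =====
def Spec_espace (s : String) (out : String) : Prop := out = espace_alt s
instance (s : String) (out : String) : Decidable (Spec_espace s out) := by unfold Spec_espace; infer_instance

-- ===== CLAIM (what is proved, stated in full; the proofs are below) =====
def Claim_equal_espace : Prop := ∀ (s : String), Dom_espace s → Spec_espace s (espace s)

-- ===== LEMMAS AND PROOFS =====

-- The common normal form: the suffix grouped in pairs, pairs separated by a space.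
def pvPairs : List Char → List Char
  | [] => []
  | [a] => [a]
  | [a, b] => [a, b]
  | a :: b :: c :: rest => a :: b :: ' ' :: pvPairs (c :: rest)

-- A's loop body as a per-index emitted segment.
def pvSegA (cs : List Char) (i : Int) : List Char :=
  ((PySem.List.pyGet? cs i).map (fun c => [c])).getD [] ++
    (if PySem.Int.mod i 2 = 1 ∧ i < (cs.length : Int) - 1 then [' '] else [])

theorem pvFoldA_eq_flatMap (cs : List Char) (l : List Int) (acc : List Char) :
    l.foldl (fun newS i =>
      let newS := newS ++ ((PySem.List.pyGet? cs i).map (fun c => [c])).getD []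
      if PySem.Int.mod i 2 = 1 ∧ i < (cs.length : Int) - 1 then newS ++ [' '] else newS) acc
    = acc ++ l.flatMap (pvSegA cs) := by
  induction l generalizing acc with
  | nil => simp
  | cons i l ih =>
    simp only [List.foldl_cons, List.flatMap_cons, ih]
    unfold pvSegA
    split <;> simp

theorem pvModTwo (j : Nat) : PySem.Int.mod (j : Int) 2 = ((j % 2 : Nat) : Int) := by
  simp only [PySem.Int.mod, Int.fmod_eq_emod]
  omega

theorem pvRange_two_nil {a b : Int} (h : b ≤ a) : PySem.List.pyRange a b 2 = [] := by
  rw [PySem.List.pyRange_of_pos a b (by omega)]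
  simp [show ¬ a < b by omega]

theorem pvRange_two_cons {a b : Int} (h : a < b) :
    PySem.List.pyRange a b 2 = a :: PySem.List.pyRange (a + 2) b 2 := by
  rw [PySem.List.pyRange_of_pos a b (by omega), PySem.List.pyRange_of_pos (a + 2) b (by omega)]
  by_cases h2 : a + 2 < b
  · have : (if a < b then ((b - a + 2 - 1) / 2).toNat else 0)
        = (if a + 2 < b then ((b - (a + 2) + 2 - 1) / 2).toNat else 0) + 1 := by
      simp only [if_pos h, if_pos h2]; omega
    rw [this, List.range_succ_eq_map]
    simp [List.map_map, Function.comp_def, mul_add]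
    intro k _; ring
  · have : (if a < b then ((b - a + 2 - 1) / 2).toNat else 0) = 1 := by
      simp only [if_pos h]; omega
    rw [this]
    simp [show ¬ a + 2 < b by omega]

-- A's flatMap over the index range from an even start j equals pvPairs of the suffix.
theorem pvKeyA (cs : List Char) : ∀ m j, cs.length - j = m → j % 2 = 0 →
    (PySem.List.pyRange (j : Int) (cs.length : Int) 1).flatMap (pvSegA cs) = pvPairs (cs.drop j) := by
  intro m
  induction m using Nat.strong_induction_on with
  | _ m ih =>
    intro j hm hj
    by_cases hle : cs.length ≤ j
    · rw [PySem.List.pyRange_one_eq_nil (by exact_mod_cast hle), List.drop_eq_nil_of_le hle]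
      simp [pvPairs]
    rw [not_le] at hle
    have hget : PySem.List.pyGet? cs (j : Int) = some cs[j] := by
      rw [PySem.List.pyGet?_natCast]; simp [hle]
    have hj2 : PySem.Int.mod (j : Int) 2 = 0 := by rw [pvModTwo]; simp [hj]
    by_cases h1 : cs.length = j + 1
    · -- exactly one character left
      have : ((cs.length : Int)) = (j : Int) + 1 := by exact_mod_cast h1
      rw [this, PySem.List.pyRange_one_singleton]
      rw [List.drop_eq_getElem_cons hle, List.drop_eq_nil_of_le (by omega)]
      simp [pvSegA, hget, pvPairs]
      omega
    · -- at least two characters left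
      have h2 : j + 2 ≤ cs.length := by omega
      have hlt1 : (j : Int) < (cs.length : Int) := by exact_mod_cast hle
      have hlt2 : (j : Int) + 1 < (cs.length : Int) := by exact_mod_cast (by omega : j + 1 < cs.length)
      rw [PySem.List.pyRange_one_cons hlt1, PySem.List.pyRange_one_cons hlt2]
      have hget1 : PySem.List.pyGet? cs ((j : Int) + 1) = some cs[j + 1] := by
        have : ((j : Int) + 1) = ((j + 1 : Nat) : Int) := by push_cast; ring
        rw [this, PySem.List.pyGet?_natCast, List.getElem?_eq_getElem (by omega)]
        rfl
      have hmod1 : PySem.Int.mod ((j : Int) + 1) 2 = 1 := by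
        have : ((j : Int) + 1) = ((j + 1 : Nat) : Int) := by push_cast; ring
        rw [this, pvModTwo]; omega
      rw [List.drop_eq_getElem_cons hle, List.drop_eq_getElem_cons (show j + 1 < cs.length by omega)]
      by_cases h3 : cs.length = j + 2
      · -- last pair: no separator
        have : ((j : Int) + 1 + 1) = (cs.length : Int) := by
          have : (cs.length : Int) = (j : Int) + 2 := by exact_mod_cast h3
          omega
        rw [this, PySem.List.pyRange_one_eq_nil (le_refl _), List.drop_eq_nil_of_le (by omega)]
        simp [pvSegA, hget, hget1, pvPairs, show ((j : Int)) % 2 = 0 by omega,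
          show ¬ ((j : Int) + 1 < (cs.length : Int) - 1) by omega]
        rfl
      · -- separator after the pair, recurse
        have h4 : j + 2 < cs.length := by omega
        have ihr := ih (cs.length - (j + 2)) (by omega) (j + 2) rfl (by omega)
        have hcast : ((j : Int) + 1 + 1) = ((j + 2 : Nat) : Int) := by push_cast; ring
        rw [hcast]
        simp only [List.flatMap_cons]
        rw [ihr]
        have hdrop : cs.drop (j + 2) = cs[j + 2] :: cs.drop (j + 3) := List.drop_eq_getElem_cons h4
        rw [hdrop]
        simp [pvSegA, hget, hget1, pvPairs, show ((j : Int)) % 2 = 0 by omega,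
          show ((j : Int) + 1) % 2 = 1 by omega,
          show (j : Int) + 1 < (cs.length : Int) - 1 by omega, ← hdrop]
        rfl

-- B's join of two-character chunks from start j equals pvPairs of the suffix.
theorem pvKeyB (cs : List Char) : ∀ m j, cs.length - j = m →
    PySem.Chars.join [' ']
      ((PySem.List.pyRange (j : Int) (cs.length : Int) 2).map
        (fun i => PySem.List.slice cs (some i) (some (i + 2))))
    = pvPairs (cs.drop j) := by
  intro m
  induction m using Nat.strong_induction_on with
  | _ m ih =>
    intro j hm
    have hslice : PySem.List.slice cs (some (j : Int)) (some ((j : Int) + 2)) = (cs.drop j).take 2 := by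
      have := PySem.List.slice_natCast_add cs j 2
      simpa using this
    by_cases hle : cs.length ≤ j
    · rw [pvRange_two_nil (by exact_mod_cast hle), List.drop_eq_nil_of_le hle]
      simp [PySem.Chars.join_nil, pvPairs]
    rw [not_le] at hle
    have hlt : (j : Int) < (cs.length : Int) := by exact_mod_cast hle
    rw [pvRange_two_cons hlt]
    by_cases h2 : j + 2 < cs.length
    · have hlt2 : ((j : Int) + 2) < (cs.length : Int) := by exact_mod_cast (by omega : j + 2 < cs.length)
      rw [pvRange_two_cons hlt2]
      have htake : (cs.drop j).take 2 = [cs[j], cs[j + 1]] := by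
        rw [List.drop_eq_getElem_cons hle, List.drop_eq_getElem_cons (show j + 1 < cs.length by omega)]
        rfl
      have ihr := ih (cs.length - (j + 2)) (by omega) (j + 2) rfl
      rw [pvRange_two_cons (by exact_mod_cast hlt2 : ((j + 2 : Nat) : Int) < (cs.length : Int))] at ihr
      rw [List.map_cons] at ihr
      push_cast at ihr
      rw [List.map_cons, List.map_cons, PySem.Chars.join_cons_cons, ihr, hslice, htake]
      rw [List.drop_eq_getElem_cons hle, List.drop_eq_getElem_cons (show j + 1 < cs.length by omega)]
      have hdrop2 : cs.drop (j + 2) = cs[j + 2] :: cs.drop (j + 3) := List.drop_eq_getElem_cons h2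
      rw [hdrop2, pvPairs, ← hdrop2]
      simp
    · -- one or two characters left: a single chunk, no separator
      rw [pvRange_two_nil (by exact_mod_cast (by omega : cs.length ≤ j + 2) : (cs.length : Int) ≤ (j : Int) + 2)]
      simp only [List.map_cons, List.map_nil]
      rw [PySem.Chars.join_singleton, hslice]
      have hlen : (cs.drop j).length ≤ 2 := by simp; omega
      have : (cs.drop j).take 2 = cs.drop j := List.take_of_length_le hlen
      rw [this]
      match hd : cs.drop j, hlen' : (cs.drop j).length with
      | [], _ => simp [pvPairs]
      | [a], _ => simp [pvPairs]
      | [a, b], _ => simp [pvPairs]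
      | a :: b :: c :: rest, _ => rw [hd] at hlen; simp at hlen

-- ===== VERDICT (by name: the statement is the Claim_ definition above) =====
theorem espace_spec : Claim_equal_espace := by
  intro s _
  unfold Spec_espace espace espace_alt
  apply String.toList_inj.mp
  rw [PySem.Str.toList_join]
  simp only [PySem.Str.len_eq, PySem.Str.toList_slice, PySem.Chars.slice, List.map_map,
    Function.comp_def, String.toList_ofList]
  rw [pvFoldA_eq_flatMap, List.nil_append]
  rw [show (" ".toList) = [' '] from rfl]
  have hA := pvKeyA s.toList (s.toList.length) 0 (by omega) (by omega)
  have hB := pvKeyB s.toList (s.toList.length) 0 (by omega)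
  simp only [Nat.cast_zero, List.drop_zero] at hA hB
  rw [hA, ← hB]
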